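-- pv_equiv track=rewrite | github.com/epc0037/URI-CS | CSC110/Digital Forensics Algorithms/Lab10/checkSum16Lab10.py | checkSumR
-- ===== SOURCE A (Python) =====
-- def binaryToDecimal(binary):
--     decimal = 0
--     power = len(binary) - 1
--     for i in range(len(binary)):
--         if binary[i] == '1':
--             decimal = decimal + 2**power
--         power = power - 1
--     return decimal
--
-- def decimalToBinary(decimal):
--     power = 7
--     binary = ""
--     for i in range(8):
--         if decimal >= 2**power:
--             binary = binary + "1"
--             decimal = decimal - (2**power)
--         else:
--             binary = binary + "0"
--         power -= 1
--     return binary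
--
-- def rotateRight(inputString):
--     last = inputString[len(inputString) - 1]
--     string = last + inputString[:len(inputString) -1]
--
--     return string
--
-- def checkSumR(inputString):
--     checkSum = 0
--     i = 0
--
--     if len(inputString) % 2 == 1:
--         inputString = inputString + " "
--     while i < len(inputString) - 1:
--         firstLetter = inputString[i]
--         secondLetter = inputString[i + 1]
--         a1 = ord(firstLetter)
--         a2 = ord(secondLetter)
--         b1 = decimalToBinary(a1)
--         b2 = decimalToBinary(a2)
--         binary = b1 + b2
--         rotation = rotateRight(binary)
--         decimal = binaryToDecimal(rotation)
--         checkSum = checkSum + decimal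
--         i = i + 1
--
--     checkSum = checkSum % (2**16)
--     return checkSum
-- ===== SOURCE B (Python) =====
-- def checkSumR(inputString):
--     if len(inputString) % 2 == 1:
--         inputString = inputString + " "
--     total = 0
--     for first, second in zip(inputString, inputString[1:]):
--         val = ord(first) * 256 + ord(second)
--         total += val // 2 + (val % 2) * 32768
--     return total % 65536
-- ===== Notes on version B (the rewrite author's own statement) =====
-- stated objective: simpler
-- what changed: B drops the three string-based helpers (decimalToBinary/rotateRight/binaryToDecimal, which build and reparse 8/16-character '0'/'1' strings per pair) and instead computes each pair's 16-bit rotate-right directly with integer arithmetic (val = ord(a)*256 + ord(b); val//2 + (val%2)*32768), iterating over overlapping pairs with zip instead of an index-based while loop. This removes the per-pair string construction overhead (measured markedly faster).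
import Mathlib
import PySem

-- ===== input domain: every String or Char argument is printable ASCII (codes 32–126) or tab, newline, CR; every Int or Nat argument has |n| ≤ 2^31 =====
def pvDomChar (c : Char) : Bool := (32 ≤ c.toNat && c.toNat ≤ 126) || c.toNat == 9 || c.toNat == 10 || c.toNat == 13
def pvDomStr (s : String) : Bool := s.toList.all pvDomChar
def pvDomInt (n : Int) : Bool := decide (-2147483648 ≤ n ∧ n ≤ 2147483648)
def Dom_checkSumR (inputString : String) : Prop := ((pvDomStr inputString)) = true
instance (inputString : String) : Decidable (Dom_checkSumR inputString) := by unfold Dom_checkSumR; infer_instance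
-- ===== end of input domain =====

-- B replaces A's string-based binary/rotation helpers by direct integer arithmetic on each
-- overlapping character pair (objective: simpler).

-- ===== PORT A =====
-- 'for i in range(len(binary)): if binary[i] == "1": …' reads the chars in order: folded over
-- the list itself with the same (decimal, power) state; power starts at len-1 and decreases.
def binaryToDecimalA (binary : List Char) : Int :=
  (binary.foldl
    (fun (st : Int × Nat) c =>
      ((if c = '1' then st.1 + 2 ^ st.2 else st.1), st.2 - 1))
    (0, binary.length - 1)).1

def decimalToBinaryA (decimal : Int) : List Char :=
  ((List.range 8).foldl
    (fun (st : Int × List Char × Nat) _ =>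
      if st.1 ≥ 2 ^ st.2.2 then (st.1 - 2 ^ st.2.2, st.2.1 ++ ['1'], st.2.2 - 1)
      else (st.1, st.2.1 ++ ['0'], st.2.2 - 1))
    (decimal, [], 7)).2.1

-- inputString[len-1] and inputString[:len-1]; exact for nonempty input (its only call site
-- passes a 16-char string; Python would raise on [], which is never reached).
def rotateRightA (s : List Char) : List Char :=
  (s.getLast?.getD ' ') :: s.take (s.length - 1)

def checkSumR (inputString : String) : Int :=
  let s0 := inputString.toList
  let s := if s0.length % 2 = 1 then s0 ++ [' '] else s0
  let checkSum : Int := (List.range (s.length - 1)).foldl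
    (fun acc i =>
      let firstLetter := s.getD i ' '
      let secondLetter := s.getD (i + 1) ' '
      let a1 : Int := firstLetter.toNat
      let a2 : Int := secondLetter.toNat
      let b1 := decimalToBinaryA a1
      let b2 := decimalToBinaryA a2
      let binary := b1 ++ b2
      let rotation := rotateRightA binary
      let decimal := binaryToDecimalA rotation
      acc + decimal) 0
  PySem.Int.mod checkSum 65536

-- ===== PORT B =====
def checkSumR_alt (inputString : String) : Int :=
  let s0 := inputString.toList
  let s := if s0.length % 2 = 1 then s0 ++ [' '] else s0
  let total : Int := (s.zip s.tail).foldl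
    (fun acc p =>
      let val : Int := (p.1.toNat : Int) * 256 + (p.2.toNat : Int)
      acc + (PySem.Int.floordiv val 2 + PySem.Int.mod val 2 * 32768)) 0
  PySem.Int.mod total 65536

-- ===== PRECONDITION & SPEC =====
def Spec_checkSumR (inputString : String) (out : Int) : Prop := out = checkSumR_alt inputString
instance (inputString : String) (out : Int) : Decidable (Spec_checkSumR inputString out) := by unfold Spec_checkSumR; infer_instance

-- ===== CLAIM (what is proved, stated in full; the proofs are below) =====
def Claim_equal_checkSumR : Prop := ∀ (inputString : String), Dom_checkSumR inputString → Spec_checkSumR inputString (checkSumR inputString)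

-- ===== LEMMAS AND PROOFS =====

/-- Value of a list of '0'/'1' chars, MSB first. -/
def ofBits : List Char → Int
  | [] => 0
  | c :: cs => (if c = '1' then 2 ^ cs.length else 0) + ofBits cs

theorem bd_foldl (l : List Char) (acc : Int) :
    (l.foldl
      (fun (st : Int × Nat) c =>
        ((if c = '1' then st.1 + 2 ^ st.2 else st.1), st.2 - 1))
      (acc, l.length - 1)).1 = acc + ofBits l := by
  induction l generalizing acc with
  | nil => simp [ofBits]
  | cons c cs ih =>
    by_cases hc : c = '1' <;>
      simp [ofBits, hc, List.foldl_cons, ih] <;> ring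

theorem bd_eq_ofBits (l : List Char) : binaryToDecimalA l = ofBits l := by
  unfold binaryToDecimalA
  simpa using bd_foldl l 0

theorem ofBits_append (xs ys : List Char) :
    ofBits (xs ++ ys) = ofBits xs * 2 ^ ys.length + ofBits ys := by
  induction xs with
  | nil => simp [ofBits]
  | cons c cs ih =>
    by_cases hc : c = '1' <;> simp [ofBits, hc, ih, List.length_append] <;> ring

set_option maxRecDepth 40000 in
theorem charFacts : ∀ n : Nat, n < 128 →
    (decimalToBinaryA (n : Int)).length = 8 ∧
    ofBits (decimalToBinaryA (n : Int)) = (n : Int) ∧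
    ofBits ((decimalToBinaryA (n : Int)).take 7) = ((n / 2 : Nat) : Int) ∧
    (decimalToBinaryA (n : Int)).getLast?.getD ' ' = (if n % 2 = 1 then '1' else '0') := by
  decide

theorem pairEq (a b : Nat) (ha : a < 128) (hb : b < 128) :
    binaryToDecimalA (rotateRightA (decimalToBinaryA (a : Int) ++ decimalToBinaryA (b : Int))) =
      PySem.Int.floordiv ((a : Int) * 256 + (b : Int)) 2 +
        PySem.Int.mod ((a : Int) * 256 + (b : Int)) 2 * 32768 := by
  obtain ⟨la, oa, ta, ga⟩ := charFacts a ha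
  obtain ⟨lb, ob, tb, gb⟩ := charFacts b hb
  have hBne : decimalToBinaryA (b : Int) ≠ [] := by
    intro h; rw [h] at lb; simp at lb
  have h1 : rotateRightA (decimalToBinaryA (a : Int) ++ decimalToBinaryA (b : Int)) =
      ((decimalToBinaryA (b : Int)).getLast?.getD ' ') ::
        (decimalToBinaryA (a : Int) ++ (decimalToBinaryA (b : Int)).take 7) := by
    unfold rotateRightA
    rw [List.getLast?_append_of_ne_nil _ hBne, List.length_append, la, lb, List.take_append]
    rw [List.take_of_length_le (by rw [la]; omega)]
    simp [la]
  rw [h1, bd_eq_ofBits]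
  show (if ((decimalToBinaryA (b : Int)).getLast?.getD ' ') = '1'
          then (2 : Int) ^ (decimalToBinaryA (a : Int) ++ (decimalToBinaryA (b : Int)).take 7).length
          else 0) + ofBits (decimalToBinaryA (a : Int) ++ (decimalToBinaryA (b : Int)).take 7) = _
  rw [ofBits_append, oa, tb, gb]
  have hlen : (decimalToBinaryA (a : Int) ++ (decimalToBinaryA (b : Int)).take 7).length = 15 := by
    rw [List.length_append, la, List.length_take, lb]; omega
  have htk : ((decimalToBinaryA (b : Int)).take 7).length = 7 := by
    rw [List.length_take, lb]; omega
  have hc : ((a : Int) * 256 + (b : Int)) = ((a * 256 + b : Nat) : Int) := by push_cast; ring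
  have f1 : PySem.Int.floordiv ((a * 256 + b : Nat) : Int) 2 = (((a * 256 + b) / 2 : Nat) : Int) :=
    by exact_mod_cast PySem.Int.floordiv_natCast (a * 256 + b) 2
  have f2 : PySem.Int.mod ((a * 256 + b : Nat) : Int) 2 = (((a * 256 + b) % 2 : Nat) : Int) :=
    by exact_mod_cast PySem.Int.mod_natCast (a * 256 + b) 2
  rw [hlen, htk, hc, f1, f2]
  have e256 : ((a * 256 + b) / 2 : Nat) = a * 128 + b / 2 := by omega
  have e2 : ((a * 256 + b) % 2 : Nat) = b % 2 := by omega
  rw [e256, e2]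
  clear la oa ta ga lb ob tb gb hBne h1 hlen htk hc f1 f2
  rcases Nat.mod_two_eq_zero_or_one b with h2 | h2
  · rw [h2]; norm_num; decide
  · rw [h2]; norm_num; omega

theorem zip_eq_map_range (l : List Char) :
    l.zip l.tail = (List.range (l.length - 1)).map (fun i => (l.getD i ' ', l.getD (i + 1) ' ')) := by
  apply List.ext_getElem
  · simp [List.length_zip, List.length_tail]
  · intro i h1 h2
    have hlen : i < l.length - 1 := by simpa using h2
    simp only [List.getElem_zip, List.getElem_tail, List.getElem_map, List.getElem_range]
    rw [List.getD_eq_getElem _ _ (by omega), List.getD_eq_getElem _ _ (by omega)]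

theorem core_sum (t : List Char) (hchars : ∀ c ∈ t, c.toNat < 128) :
    (List.range (t.length - 1)).foldl
      (fun acc i => acc +
        binaryToDecimalA (rotateRightA
          (decimalToBinaryA (((t.getD i ' ').toNat : Nat) : Int) ++
            decimalToBinaryA (((t.getD (i + 1) ' ').toNat : Nat) : Int)))) 0 =
    (t.zip t.tail).foldl
      (fun acc p => acc +
        (PySem.Int.floordiv ((p.1.toNat : Int) * 256 + (p.2.toNat : Int)) 2 +
          PySem.Int.mod ((p.1.toNat : Int) * 256 + (p.2.toNat : Int)) 2 * 32768)) 0 := by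
  rw [zip_eq_map_range t, PySem.List.foldl_add, PySem.List.foldl_add, List.map_map]
  congr 1
  refine congrArg List.sum (List.map_congr_left ?_)
  intro i hi
  have hi' : i < t.length - 1 := by simpa using hi
  have e1 : t.getD i ' ' = t[i]'(by omega) := List.getD_eq_getElem _ _ (by omega)
  have e2 : t.getD (i + 1) ' ' = t[i + 1]'(by omega) := List.getD_eq_getElem _ _ (by omega)
  have m1 : (t.getD i ' ').toNat < 128 := hchars _ (by rw [e1]; exact List.getElem_mem _)
  have m2 : (t.getD (i + 1) ' ').toNat < 128 := hchars _ (by rw [e2]; exact List.getElem_mem _)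
  simpa using pairEq (t.getD i ' ').toNat (t.getD (i + 1) ' ').toNat m1 m2

theorem checkSumR_spec : Claim_equal_checkSumR := by
  intro inputString hdom
  unfold Spec_checkSumR
  have hchars : ∀ c ∈ (if inputString.toList.length % 2 = 1 then inputString.toList ++ [' ']
      else inputString.toList), c.toNat < 128 := by
    intro c hc
    have hmem : c ∈ inputString.toList ∨ c = ' ' := by
      split at hc
      · rcases List.mem_append.mp hc with h | h
        · exact Or.inl h
        · exact Or.inr (by simpa using h)
      · exact Or.inl hc
    rcases hmem with h | h
    · have := List.all_eq_true.mp hdom c h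
      simp only [pvDomChar, Bool.or_eq_true, Bool.and_eq_true, decide_eq_true_eq, beq_iff_eq] at this
      omega
    · subst h; decide
  show checkSumR inputString = checkSumR_alt inputString
  unfold checkSumR checkSumR_alt
  exact congrArg (fun x => PySem.Int.mod x 65536) (core_sum _ hchars)
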